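-- pv_equiv track=rewrite | github.com/jihunJeong/Algorithm | LabTudy/18.py | recurrent
-- ===== SOURCE A (Python) =====
-- def split(string):
--     count = 0
--     u, v = "", ""
--     for s in string:
--         if s =="(":
--             count += 1
--         else :
--             count -= 1
--         u += s
--         if count == 0:
--             break
--     v = string[len(u):]
--     return u, v
--
-- def check(string):
--     stack = []
--     for s in string:
--         if s == "(":
--             stack.append(s)
--         else :
--             if stack:
--                 stack.pop()
--             else :
--                 return False
--     return True
--
-- def recurrent(string):
--     if string == "":
--         return ""
--     u, v = split(string)
--     if check(u):
--         return u + recurrent(v)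
--     else :
--         ans = "(" + recurrent(v) + ")"
--         for i in range(1, len(u)-1):
--             if u[i] == "(":
--                 ans += ")"
--             else :
--                 ans += "("
--         return ans
-- ===== SOURCE B (Python) =====
-- def _correct(u):
--     cnt = 0
--     for c in u:
--         if c == "(":
--             cnt += 1
--         elif cnt > 0:
--             cnt -= 1
--         else:
--             return False
--     return True
--
-- def recurrent(string):
--     # phase 1: peel the string into its balance-zero segments
--     segs = []
--     rest = string
--     while rest:
--         cnt = 0
--         i = 0
--         for ch in rest:
--             cnt += 1 if ch == "(" else -1
--             i += 1
--             if cnt == 0: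
--                 break
--         segs.append(rest[:i])
--         rest = rest[i:]
--     # phase 2: fold over the segments from last to first
--     acc = ""
--     for u in reversed(segs):
--         if _correct(u):
--             acc = u + acc
--         else:
--             acc = "(" + acc + ")" + "".join(")" if c == "(" else "(" for c in u[1:len(u)-1])
--     return acc
-- ===== Notes on version B (the rewrite author's own statement) =====
-- stated objective: alternative
-- what changed: Recursion is replaced by an explicit two-phase iteration: first a loop peels the string into its balance-zero segments, then a fold over that segment list in reverse builds the answer with an accumulator; the stack-based validity check becomes a counter scan (no recursion, no list allocations in the check).
import Mathlib
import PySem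

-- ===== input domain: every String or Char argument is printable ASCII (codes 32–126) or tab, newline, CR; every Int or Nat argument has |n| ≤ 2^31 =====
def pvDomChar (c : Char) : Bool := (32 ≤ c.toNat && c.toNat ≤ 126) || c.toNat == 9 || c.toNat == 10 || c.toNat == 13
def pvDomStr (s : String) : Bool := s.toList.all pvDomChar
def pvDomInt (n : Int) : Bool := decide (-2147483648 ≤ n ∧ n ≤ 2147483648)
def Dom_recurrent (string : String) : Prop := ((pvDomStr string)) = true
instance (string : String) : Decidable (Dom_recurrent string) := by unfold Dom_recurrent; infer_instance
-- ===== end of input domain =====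

-- B replaces A's top-down recursion by an explicit two-phase iteration (peel all segments, then
-- fold over them in reverse) and the stack-based check by a counter scan; same output, same cost.

-- ===== PORT A =====
-- A's split: build u char by char until the running count hits 0 (break), else consume everything.
def splitU : List Char → Int → List Char → List Char
  | [], _, u => u
  | c :: rest, count, u =>
      let count' := if c = '(' then count + 1 else count - 1
      let u' := u ++ [c]
      if count' = 0 then u' else splitU rest count' u'

-- A's split returns (u, string[len(u):]); the slice has a nonnegative in-range start, so it is drop.
def splitA (l : List Char) : List Char × List Char :=
  let u := splitU l 0 []
  (u, l.drop u.length)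

-- A's check with its explicit stack of '(' characters.
def checkA : List Char → List Char → Bool
  | [], _ => true
  | c :: rest, stack =>
      if c = '(' then checkA rest ('(' :: stack)
      else match stack with
        | _ :: s => checkA rest s
        | [] => false

theorem splitU_length_le : ∀ (l : List Char) (count : Int) (u : List Char),
    u.length ≤ (splitU l count u).length := by
  intro l
  induction l with
  | nil => intro count u; exact le_rfl
  | cons c rest ih =>
      intro count u
      simp only [splitU]
      split <;> split
      · simp
      · exact le_trans (by simp) (ih _ (u ++ [c]))
      · simp
      · exact le_trans (by simp) (ih _ (u ++ [c]))

theorem splitA_snd_lt (l : List Char) (h : l ≠ []) : (splitA l).2.length < l.length := by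
  obtain ⟨c, rest, rfl⟩ := List.exists_cons_of_ne_nil h
  have h1 : 1 ≤ (splitU (c :: rest) 0 []).length := by
    simp only [splitU]
    split <;> split
    · simp
    · exact le_trans (by simp) (splitU_length_le rest _ [c])
    · simp
    · exact le_trans (by simp) (splitU_length_le rest _ [c])
  simp only [splitA, List.length_drop]
  simp only [List.length_cons]
  omega

-- A's recurrent: in the else branch the for-loop over range(1, len(u)-1) appends the flipped
-- interior characters to ans; pyGet? is in range for every index the loop produces.
def recurrentGo (l : List Char) : List Char :=
  if h : l = [] then []
  else
    let p := splitA l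
    if checkA p.1 [] then p.1 ++ recurrentGo p.2
    else
      (PySem.List.pyRange 1 ((p.1.length : Int) - 1) 1).foldl
        (fun ans i => if PySem.List.pyGet? p.1 i = some '(' then ans ++ [')'] else ans ++ ['('])
        (['('] ++ recurrentGo p.2 ++ [')'])
termination_by l.length
decreasing_by all_goals exact splitA_snd_lt l h

def recurrent (string : String) : String := String.mk (recurrentGo string.toList)

-- ===== PORT B =====
-- B's inner for-loop: the index i at which the running count first hits 0 (or the length).
def peelLen : List Char → Int → Nat → Nat
  | [], _, i => i
  | c :: rest, cnt, i =>
      let cnt' := cnt + (if c = '(' then 1 else -1)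
      if cnt' = 0 then i + 1 else peelLen rest cnt' (i + 1)

theorem peelLen_ge : ∀ (l : List Char) (cnt : Int) (i : Nat), i ≤ peelLen l cnt i := by
  intro l
  induction l with
  | nil => intro cnt i; exact le_rfl
  | cons c rest ih =>
      intro cnt i
      simp only [peelLen]
      split <;> split
      · omega
      · exact le_trans (by omega) (ih _ (i + 1))
      · omega
      · exact le_trans (by omega) (ih _ (i + 1))

-- B's while loop: peel the string into segments; rest[:i] / rest[i:] have a nonnegative
-- in-range bound, so they are take/drop.
def segments (l : List Char) : List (List Char) :=
  if h : l = [] then []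
  else
    let i := peelLen l 0 0
    l.take i :: segments (l.drop i)
termination_by l.length
decreasing_by
  have h1 : 1 ≤ peelLen l 0 0 := by
    obtain ⟨c, rest, rfl⟩ := List.exists_cons_of_ne_nil h
    simp only [peelLen]
    split <;> split
    · omega
    · exact le_trans (by omega) (peelLen_ge rest _ 1)
    · omega
    · exact le_trans (by omega) (peelLen_ge rest _ 1)
  have h2 : 0 < l.length := List.length_pos_of_ne_nil h
  simp only [List.length_drop]
  omega

-- B's counter-based correctness scan.
def corrGo : List Char → Int → Bool
  | [], _ => true
  | c :: rest, cnt =>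
      if c = '(' then corrGo rest (cnt + 1)
      else if cnt > 0 then corrGo rest (cnt - 1)
      else false

-- B's reverse fold; u[1:len(u)-1] is the interior slice, flipped by a map.
def buildB (segs : List (List Char)) : List Char :=
  segs.reverse.foldl
    (fun acc u =>
      if corrGo u 0 then u ++ acc
      else '(' :: acc ++ ')' :: ((u.drop 1).take (u.length - 2)).map
        (fun c => if c = '(' then ')' else '('))
    []

def recurrent_alt (string : String) : String := String.mk (buildB (segments string.toList))

-- ===== PRECONDITION & SPEC =====
def Spec_recurrent (string : String) (out : String) : Prop := out = recurrent_alt string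
instance (string : String) (out : String) : Decidable (Spec_recurrent string out) := by unfold Spec_recurrent; infer_instance

-- ===== CLAIM (what is proved, stated in full; the proofs are below) =====
def Claim_equal_recurrent : Prop := ∀ (string : String), Dom_recurrent string → Spec_recurrent string (recurrent string)

-- ===== LEMMAS AND PROOFS =====

-- the running index in B's peelLen is a plain offset
theorem peelLen_shift : ∀ (l : List Char) (cnt : Int) (i : Nat),
    peelLen l cnt i = i + peelLen l cnt 0 := by
  intro l
  induction l with
  | nil => intro cnt i; simp [peelLen]
  | cons c rest ih =>
      intro cnt i
      simp only [peelLen]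
      split <;> split
      · omega
      · rw [ih _ (i + 1), ih _ 1]; omega
      · omega
      · rw [ih _ (i + 1), ih _ 1]; omega

-- A's split-prefix is exactly the take of B's peel length
theorem splitU_eq_take : ∀ (l : List Char) (cnt : Int) (u : List Char),
    splitU l cnt u = u ++ l.take (peelLen l cnt 0) := by
  intro l
  induction l with
  | nil => intro cnt u; simp [splitU, peelLen]
  | cons c rest ih =>
      intro cnt u
      simp only [splitU, peelLen]
      have hc : (if c = '(' then cnt + 1 else cnt - 1) = cnt + (if c = '(' then 1 else -1) := by
        split <;> ring
      rw [hc]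
      split <;> split
      · simp
      · rw [ih, peelLen_shift rest _ 1, Nat.add_comm 1, List.take_succ_cons]
        simp
      · simp
      · rw [ih, peelLen_shift rest _ 1, Nat.add_comm 1, List.take_succ_cons]
        simp

-- A's check with a stack equals B's counter scan
theorem checkA_eq_corrGo : ∀ (l : List Char) (stack : List Char),
    checkA l stack = corrGo l (stack.length : Int) := by
  intro l
  induction l with
  | nil => intro stack; simp [checkA, corrGo]
  | cons c rest ih =>
      intro stack
      simp only [checkA, corrGo]
      split
      · have harg : ((('(' :: stack).length : Nat) : Int) = (stack.length : Int) + 1 := by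
          simp only [List.length_cons]; push_cast; ring
        rw [ih ('(' :: stack), harg]
      · cases stack with
        | nil => simp
        | cons h t =>
            have hm : (match h :: t with
                | _ :: s => checkA rest s
                | [] => false) = checkA rest t := rfl
            have hpos : ((h :: t).length : Int) > 0 := by
              simp only [List.length_cons]; push_cast; omega
            have harg : ((h :: t).length : Int) - 1 = (t.length : Int) := by
              simp only [List.length_cons]; push_cast; ring
            rw [hm, ih t, if_pos hpos, harg]

-- A's flip loop over pyRange equals a map over the interior sublist
theorem flip_fold (u : List Char) : ∀ (b a : Nat) (init : List Char), a + b ≤ u.length →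
    (PySem.List.pyRange (a : Int) ((a + b : Nat) : Int) 1).foldl
      (fun ans i => if PySem.List.pyGet? u i = some '(' then ans ++ [')'] else ans ++ ['('])
      init
    = init ++ ((u.drop a).take b).map (fun c => if c = '(' then ')' else '(') := by
  intro b
  induction b with
  | zero =>
      intro a init _
      rw [PySem.List.pyRange_one_eq_nil (by push_cast; omega)]
      simp
  | succ b ih =>
      intro a init hab
      rw [PySem.List.pyRange_one_cons (by push_cast; omega)]
      simp only [List.foldl_cons]
      have ha : a < u.length := by omega
      have hget : PySem.List.pyGet? u (a : Int) = some u[a] := by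
        rw [PySem.List.pyGet?_natCast]; exact List.getElem?_eq_getElem ha
      have hdrop : u.drop a = u[a] :: u.drop (a + 1) := by
        rw [List.drop_eq_getElem_cons ha]
      have hcast : ((a : Int) + 1) = ((a + 1 : Nat) : Int) := by push_cast; ring
      have hcast2 : ((a + (b + 1) : Nat) : Int) = (((a + 1) + b : Nat) : Int) := by push_cast; ring
      rw [hget, hcast, hcast2, ih (a + 1) _ (by omega)]
      rw [hdrop]
      simp only [List.take_succ_cons, List.map_cons]
      split <;> simp_all
  -- (the two branches append the single flipped character before the rest of the map)

-- peeling off one segment: buildB over a cons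
theorem buildB_cons (u : List Char) (segs : List (List Char)) :
    buildB (u :: segs) =
      (if corrGo u 0 then u ++ buildB segs
       else '(' :: buildB segs ++ ')' :: ((u.drop 1).take (u.length - 2)).map
         (fun c => if c = '(' then ')' else '(')) := by
  simp only [buildB, List.reverse_cons, List.foldl_append, List.foldl_cons, List.foldl_nil]

theorem drop_min_length (l : List Char) (k : Nat) : l.drop (min k l.length) = l.drop k := by
  rcases le_or_gt k l.length with h | h
  · rw [min_eq_left h]
  · rw [min_eq_right (by omega)]
    rw [List.drop_length, List.drop_eq_nil_of_le (by omega)]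

-- the heart of the equivalence: A's recursion computes B's reverse fold over the segments
theorem recurrentGo_eq_buildB (l : List Char) : recurrentGo l = buildB (segments l) := by
  induction hn : l.length using Nat.strong_induction_on generalizing l with
  | _ n ih =>
  subst hn
  by_cases h : l = []
  · subst h; simp [recurrentGo, segments, buildB]
  · rw [recurrentGo, segments]
    simp only [h, dif_neg, not_false_iff]
    have hu : (splitA l).1 = l.take (peelLen l 0 0) := by
      simp [splitA, splitU_eq_take]
    have hv : (splitA l).2 = l.drop (peelLen l 0 0) := by
      simp only [splitA, splitU_eq_take l 0 [], List.nil_append, List.length_take]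
      exact drop_min_length l _
    have hrec : recurrentGo (splitA l).2 = buildB (segments (l.drop (peelLen l 0 0))) := by
      rw [hv]
      exact ih _ (by rw [← hv]; exact splitA_snd_lt l h) _ rfl
    rw [buildB_cons]
    have hcheck : checkA (splitA l).1 [] = corrGo (l.take (peelLen l 0 0)) 0 := by
      rw [hu, checkA_eq_corrGo]; rfl
    rw [hcheck]
    split
    · rw [hu, hrec]
    · set u := l.take (peelLen l 0 0) with hu'
      rw [hu, hrec]
      rcases Nat.lt_or_ge u.length 2 with hlen | hlen
      · -- interior is empty: the range is empty on both sides
        have : ((u.length : Int) - 1) ≤ 1 := by omega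
        rw [PySem.List.pyRange_one_eq_nil this]
        interval_cases hl : u.length <;>
          simp_all [List.foldl_nil]
      · have hcast : ((u.length : Int) - 1) = ((1 + (u.length - 2) : Nat) : Int) := by
          push_cast; omega
        rw [hcast]
        simpa using flip_fold u (u.length - 2) 1
          (['('] ++ buildB (segments (List.drop (peelLen l 0 0) l)) ++ [')']) (by omega)

-- ===== VERDICT (by name: the statement is the Claim_ definition above) =====
theorem recurrent_spec : Claim_equal_recurrent := by
  intro string _
  unfold Spec_recurrent recurrent recurrent_alt
  rw [recurrentGo_eq_buildB]
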